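-- pv_equiv track=rewrite | github.com/lingxiao/learn-adj-relation | scripts/make_test_set_no_tie.py | remove_ties
-- ===== SOURCE A (Python) =====
-- def remove_ties(clusters):
--
-- 	def fn(cluster, out):
--
-- 		if not cluster:
-- 			return out
--
-- 		else:
-- 			head = cluster[0]
-- 			tail = cluster[1:]
--
-- 			if len(head) == 1:
-- 				if not out:
-- 					return fn( tail, [head] )
-- 				else:
-- 					out1 = [c + head for c in out]
-- 					return fn( tail, out1 )
--
-- 			else:
-- 				if not out:
-- 					return fn (tail, [[h] for h in head] )
-- 				else:
-- 					out_    = out*len(head)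
-- 					rep_len = max(1, len(out_) - len(head))
-- 					out1    = [x + [y] for x,y in zip(out_, head * rep_len)]
-- 					return fn( tail, out1 )
--
-- 	out = fn(clusters,[])
-- 	ret = []
--
-- 	for o in out:
-- 		ret.append([[x] for x in o])
--
-- 	return ret
-- ===== SOURCE B (Python) =====
-- def remove_ties(clusters):
--     # Iterative fold; the multi-element/non-empty accumulator step uses a closed
--     # index formula out[i % n] + [head[i % k]] instead of list-multiplication + zip.
--     out = []
--     for head in clusters:
--         n, k = len(out), len(head)
--         if k == 1:
--             out = [head] if not out else [c + head for c in out]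
--         elif not out:
--             out = [[h] for h in head]
--         else:
--             out = [out[i % n] + [head[i % k]] for i in range(n * k)]
--     return [[[x] for x in o] for o in out]
-- ===== Notes on version B (the rewrite author's own statement) =====
-- stated objective: alternative
-- what changed: The tail-recursive accumulator helper becomes an iterative fold, and the list-multiplication/zip/rep_len arithmetic of the multi-element step is replaced by a closed index formula out[i % n] + [head[i % k]] over range(n*k); the final append loop becomes a comprehension.
import Mathlib
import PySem

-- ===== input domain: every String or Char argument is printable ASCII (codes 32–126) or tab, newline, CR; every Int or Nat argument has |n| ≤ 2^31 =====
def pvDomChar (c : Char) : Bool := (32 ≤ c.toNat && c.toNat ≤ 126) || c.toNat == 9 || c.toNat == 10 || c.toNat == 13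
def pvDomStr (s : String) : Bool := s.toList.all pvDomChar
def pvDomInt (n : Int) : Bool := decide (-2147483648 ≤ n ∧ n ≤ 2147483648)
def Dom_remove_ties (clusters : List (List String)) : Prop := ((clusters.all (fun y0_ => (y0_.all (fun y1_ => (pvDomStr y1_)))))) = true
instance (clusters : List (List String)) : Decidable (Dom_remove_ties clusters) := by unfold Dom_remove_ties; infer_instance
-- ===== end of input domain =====

-- B replaces A's tail recursion + list-multiplication/zip arithmetic by an iterative fold
-- with a closed index formula; same outputs (alternative decomposition, no speed claim).

-- ===== PORT A =====
-- Python `l * m` (list repetition)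
def pyListMul {α : Type} (l : List α) (m : Int) : List α :=
  List.flatten (List.replicate m.toNat l)

def remove_ties_fn (cluster : List (List String)) (out : List (List String)) :
    List (List String) :=
  match cluster with
  | [] => out
  | head :: tail =>
    if head.length == 1 then
      if out.isEmpty then
        remove_ties_fn tail [head]
      else
        remove_ties_fn tail (out.map (fun c => c ++ head))
    else
      if out.isEmpty then
        remove_ties_fn tail (head.map (fun h => [h]))
      else
        let out_ := pyListMul out (head.length : Int)
        let rep_len : Int := max 1 ((out_.length : Int) - (head.length : Int))
        let out1 := (List.zip out_ (pyListMul head rep_len)).map (fun p => p.1 ++ [p.2])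
        remove_ties_fn tail out1

def remove_ties (clusters : List (List String)) : List (List (List String)) :=
  let out := remove_ties_fn clusters []
  out.foldl (fun ret o => ret ++ [o.map (fun x => [x])]) []

-- ===== PORT B =====
-- one loop step of Source B; the indexing out[i % n], head[i % k] is in range (0 < n, k),
-- so getD is exact
def remove_ties_step (out : List (List String)) (head : List String) :
    List (List String) :=
  let n := out.length
  let k := head.length
  if k == 1 then
    if out.isEmpty then [head] else out.map (fun c => c ++ head)
  else if out.isEmpty then
    head.map (fun h => [h])
  else
    (List.range (n * k)).map (fun i => out.getD (i % n) [] ++ [head.getD (i % k) ""])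

def remove_ties_alt (clusters : List (List String)) : List (List (List String)) :=
  (clusters.foldl remove_ties_step []).map (fun o => o.map (fun x => [x]))

-- ===== PRECONDITION & SPEC =====
def Spec_remove_ties (clusters : List (List String)) (out : List (List (List String))) : Prop := out = remove_ties_alt clusters
instance (clusters : List (List String)) (out : List (List (List String))) : Decidable (Spec_remove_ties clusters out) := by unfold Spec_remove_ties; infer_instance

-- ===== CLAIM (what is proved, stated in full; the proofs are below) =====
def Claim_equal_remove_ties : Prop := ∀ (clusters : List (List String)), Dom_remove_ties clusters → Spec_remove_ties clusters (remove_ties clusters)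

-- ===== LEMMAS AND PROOFS =====

theorem length_pyListMul {α : Type} (l : List α) (m : Int) :
    (pyListMul l m).length = m.toNat * l.length := by
  simp [pyListMul]

theorem getElem_flatten_replicate {α : Type} (l : List α) (m i : Nat)
    (h : i < ((List.replicate m l).flatten).length) :
    ((List.replicate m l).flatten)[i] = l[i % l.length]'(by
      rcases l with _ | ⟨a, t⟩
      · simp at h
      · exact Nat.mod_lt _ (by simp)) := by
  induction m generalizing i with
  | zero => simp at h
  | succ m ih =>
    have hfl : (List.replicate (m+1) l).flatten = l ++ (List.replicate m l).flatten := by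
      simp [List.replicate_succ]
    rw [List.getElem_of_eq hfl]
    have h' : i < (l ++ (List.replicate m l).flatten).length := hfl ▸ h
    by_cases hi : i < l.length
    · rw [List.getElem_append_left hi]
      congr 1
      exact (Nat.mod_eq_of_lt hi).symm
    · rw [Nat.not_lt] at hi
      have h2 : i - l.length < ((List.replicate m l).flatten).length := by
        simp only [List.length_append] at h'
        omega
      rw [List.getElem_append_right hi]
      rw [ih _ h2]
      congr 1
      conv_rhs => rw [← Nat.sub_add_cancel hi]
      rw [Nat.add_mod_right]

theorem step_eq (out : List (List String)) (head : List String)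
    (hk : ¬ head.length = 1) (ho : out ≠ []) :
    (List.zip (pyListMul out (head.length : Int))
        (pyListMul head (max 1 (((pyListMul out (head.length : Int)).length : Int)
          - (head.length : Int))))).map (fun p => p.1 ++ [p.2])
      = remove_ties_step out head := by
  have hn : 0 < out.length := List.length_pos_iff.mpr ho
  have hout : ¬ out.isEmpty := by simp [List.isEmpty_iff, ho]
  have hL1 : (pyListMul out ((head.length : Int))).length = head.length * out.length := by
    simp [length_pyListMul]
  have hrep : (max 1 (((pyListMul out (head.length : Int)).length : Int)
      - (head.length : Int))).toNat = max 1 (head.length * out.length - head.length) := by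
    rw [hL1]; omega
  have hL2 : (pyListMul head (max 1 (((pyListMul out (head.length : Int)).length : Int)
      - (head.length : Int)))).length
      = max 1 (head.length * out.length - head.length) * head.length := by
    rw [length_pyListMul, hrep]
  have hbound : head.length * out.length
      ≤ max 1 (head.length * out.length - head.length) * head.length := by
    rcases Nat.eq_zero_or_pos head.length with h0 | hkpos
    · simp [h0]
    · have hk2 : 2 ≤ head.length := by omega
      have hmax : out.length ≤ max 1 (head.length * out.length - head.length) := by
        rcases Nat.lt_or_ge out.length 2 with h1 | h2
        · have h1' : out.length = 1 := by omega
          rw [h1']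
          exact le_max_left _ _
        · have h4 : head.length * (out.length - 1) + head.length
              = head.length * out.length := by
            have hh : out.length - 1 + 1 = out.length := by omega
            calc head.length * (out.length - 1) + head.length
                = head.length * ((out.length - 1) + 1) := by ring
              _ = head.length * out.length := by rw [hh]
          have h3 : 2 * (out.length - 1) ≤ head.length * (out.length - 1) :=
            Nat.mul_le_mul_right _ hk2
          have h5 := Nat.le_max_right 1 (head.length * out.length - head.length)
          omega
      calc head.length * out.length
          = out.length * head.length := Nat.mul_comm _ _
        _ ≤ max 1 (head.length * out.length - head.length) * head.length :=
            Nat.mul_le_mul_right _ hmax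
  have hstep : remove_ties_step out head
      = (List.range (out.length * head.length)).map
          (fun i => out.getD (i % out.length) [] ++ [head.getD (i % head.length) ""]) := by
    simp [remove_ties_step, hout, hk]
  rw [hstep]
  have hc : head.length * out.length = out.length * head.length := Nat.mul_comm _ _
  apply List.ext_getElem
  · rw [List.length_map, List.length_zip, List.length_map, List.length_range, hL2, hL1]
    omega
  · intro i h1 h2
    rw [List.length_map, List.length_range] at h2
    have hkpos : 0 < head.length := by
      by_contra hcc
      have : head.length = 0 := by omega
      rw [this] at h2
      omega
    simp only [List.getElem_map, List.getElem_range, List.getElem_zip]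
    have hi1 : i < (pyListMul out ((head.length : Int))).length := by rw [hL1]; omega
    have hi2 : i < (pyListMul head (max 1 (((pyListMul out (head.length : Int)).length : Int)
        - (head.length : Int)))).length := by rw [hL2]; omega
    have eq1 : pyListMul out ((head.length : Int))
        = (List.replicate head.length out).flatten := by
      simp [pyListMul]
    have eq2 : pyListMul head (max 1 (((pyListMul out (head.length : Int)).length : Int)
        - (head.length : Int)))
        = (List.replicate (max 1 (head.length * out.length - head.length)) head).flatten := by
      show List.flatten (List.replicate (max 1 (((pyListMul out (head.length : Int)).length : Int)
        - (head.length : Int))).toNat head)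
        = (List.replicate (max 1 (head.length * out.length - head.length)) head).flatten
      rw [hrep]
    rw [List.getElem_of_eq eq1, List.getElem_of_eq eq2]
    rw [getElem_flatten_replicate out head.length i (by rw [← eq1]; exact hi1)]
    rw [getElem_flatten_replicate head _ i (by rw [← eq2]; exact hi2)]
    rw [List.getD_eq_getElem out [] (Nat.mod_lt _ hn),
        List.getD_eq_getElem head "" (Nat.mod_lt _ hkpos)]

theorem fn_eq_foldl (cluster : List (List String)) (out : List (List String)) :
    remove_ties_fn cluster out = cluster.foldl remove_ties_step out := by
  induction cluster generalizing out with
  | nil => simp [remove_ties_fn]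
  | cons head tail ih =>
    rw [List.foldl_cons, ← ih]
    by_cases hk : head.length = 1
    · by_cases ho : out = []
      · subst ho
        simp [remove_ties_fn, remove_ties_step, hk]
      · have hout : ¬ out.isEmpty := by simp [List.isEmpty_iff, ho]
        simp [remove_ties_fn, remove_ties_step, hk, hout]
    · by_cases ho : out = []
      · subst ho
        simp [remove_ties_fn, remove_ties_step, hk]
      · have hout : ¬ out.isEmpty := by simp [List.isEmpty_iff, ho]
        simp only [remove_ties_fn, hk, beq_iff_eq, if_false, hout, Bool.false_eq_true]
        rw [step_eq out head hk ho]

theorem foldl_append_map {α β : Type} (f : α → β) (l : List α) (acc : List β) :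
    l.foldl (fun ret o => ret ++ [f o]) acc = acc ++ l.map f := by
  induction l generalizing acc with
  | nil => simp
  | cons a t ih => simp [ih]

-- ===== VERDICT (by name: the statement is the Claim_ definition above) =====
theorem remove_ties_spec : Claim_equal_remove_ties := by
  intro clusters _
  unfold Spec_remove_ties remove_ties remove_ties_alt
  rw [fn_eq_foldl, foldl_append_map]
  simp
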